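-- pv_equiv track=rewrite | github.com/arnoringi/forritun | Assignment 15 (Sets)/15_3) Bigrams.py | create_bigram_list
-- ===== SOURCE A (Python) =====
-- def create_bigram_list(my_list):
--     list_temp = []
--     tuple_list = []
--     index = 0
--
--     for word in my_list:
--         try:
--             list_temp.append(word)
--             list_temp.append(my_list[index+1])
--             index += 1
--
--             tuple_list.append(tuple(list_temp))
--             list_temp.clear()
--         except IndexError:
--             pass
--
--     return tuple_list
-- ===== SOURCE B (Python) =====
-- def create_bigram_list(my_list):
--     return list(zip(my_list, my_list[1:]))
-- ===== Notes on version B (the rewrite author's own statement) =====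
-- stated objective: idiomatic
-- what changed: Replaces the manual index counter, try/except IndexError and temporary two-element list with a single zip of the list against its one-element-shifted slice.
import Mathlib
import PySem

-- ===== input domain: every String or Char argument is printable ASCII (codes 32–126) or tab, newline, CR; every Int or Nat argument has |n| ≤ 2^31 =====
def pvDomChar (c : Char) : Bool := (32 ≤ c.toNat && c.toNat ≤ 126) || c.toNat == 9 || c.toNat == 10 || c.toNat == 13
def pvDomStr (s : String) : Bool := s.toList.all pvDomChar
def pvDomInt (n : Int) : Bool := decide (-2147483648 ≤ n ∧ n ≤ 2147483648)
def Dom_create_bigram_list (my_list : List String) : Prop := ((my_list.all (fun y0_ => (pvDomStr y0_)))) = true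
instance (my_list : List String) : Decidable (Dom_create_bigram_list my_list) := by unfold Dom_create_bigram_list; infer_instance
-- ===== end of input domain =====

-- B replaces A's index counter, try/except and temporary list by zipping the list with its shifted slice (idiomatic, same cost).

-- ===== PORT A =====
-- loop body: append word and my_list[index+1] to list_temp; on IndexError pass (list_temp keeps word).
-- tuple(list_temp) always has exactly two elements on every real run (the IndexError can only occur at the
-- last word, after which nothing more is appended), so the catch-all match arm below is unreachable.
def bigramStep (my_list : List String) (st : List String × List (String × String) × Nat)
    (word : String) : List String × List (String × String) × Nat :=
  let lt := st.1 ++ [word]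
  match PySem.List.pyGet? my_list ((st.2.2 : Int) + 1) with
  | none => (lt, st.2.1, st.2.2)          -- except IndexError: pass
  | some w =>
    match lt ++ [w] with
    | [a, b] => ([], st.2.1 ++ [(a, b)], st.2.2 + 1)
    | other  => (other, st.2.1, st.2.2 + 1)  -- unreachable on every run (see comment above)

def create_bigram_list (my_list : List String) : List (String × String) :=
  (my_list.foldl (bigramStep my_list) ([], [], 0)).2.1

-- ===== PORT B =====
def create_bigram_list_alt (my_list : List String) : List (String × String) :=
  my_list.zip (PySem.List.slice my_list (some 1) none)

-- ===== PRECONDITION & SPEC =====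
def Spec_create_bigram_list (my_list : List String) (out : List (String × String)) : Prop := out = create_bigram_list_alt my_list
instance (my_list : List String) (out : List (String × String)) : Decidable (Spec_create_bigram_list my_list out) := by unfold Spec_create_bigram_list; infer_instance

-- ===== CLAIM (what is proved, stated in full; the proofs are below) =====
def Claim_equal_create_bigram_list : Prop := ∀ (my_list : List String), Dom_create_bigram_list my_list → Spec_create_bigram_list my_list (create_bigram_list my_list)

-- ===== LEMMAS AND PROOFS =====

-- Invariant of A's loop: starting at position i with empty list_temp, the fold over the remaining
-- suffix appends exactly the bigrams of that suffix to the accumulator.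
theorem bigram_fold_inv (l : List String) :
    ∀ (n i : Nat) (acc : List (String × String)), l.length - i ≤ n →
    ((l.drop i).foldl (bigramStep l) ([], acc, i)).2.1
      = acc ++ (l.drop i).zip (l.drop (i + 1)) := by
  intro n
  induction n with
  | zero =>
    intro i acc h
    have hi : l.length ≤ i := by omega
    simp [List.drop_eq_nil_of_le hi, List.drop_eq_nil_of_le (le_trans hi (Nat.le_succ_of_le le_rfl))]
  | succ n ih =>
    intro i acc h
    by_cases hi : i < l.length
    · have hdrop : l.drop i = l[i] :: l.drop (i + 1) := List.drop_eq_getElem_cons hi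
      rw [hdrop]
      simp only [List.foldl_cons]
      by_cases hnext : i + 1 < l.length
      · have hget : PySem.List.pyGet? l ((i : Int) + 1) = some l[i + 1] := by
          have : ((i : Int) + 1) = ((i + 1 : Nat) : Int) := by push_cast; ring
          rw [this, PySem.List.pyGet?_natCast, List.getElem?_eq_getElem hnext]
        have hdrop2 : l.drop (i + 1) = l[i + 1] :: l.drop (i + 2) := List.drop_eq_getElem_cons hnext
        rw [show bigramStep l ([], acc, i) l[i]
              = ([], acc ++ [(l[i], l[i + 1])], i + 1) by simp [bigramStep, hget]]
        rw [ih (i + 1) (acc ++ [(l[i], l[i + 1])]) (by omega)]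
        nth_rewrite 2 [hdrop2]
        simp only [List.zip]
        simp [show i + 1 + 1 = i + 2 from rfl]
        conv_rhs => rw [hdrop, hdrop2]
        conv_lhs => rw [hdrop2]
        rw [List.zipWith_cons_cons]
      · have hget : PySem.List.pyGet? l ((i : Int) + 1) = none := by
          have : ((i : Int) + 1) = ((i + 1 : Nat) : Int) := by push_cast; ring
          rw [this, PySem.List.pyGet?_natCast, List.getElem?_eq_none (by omega)]
        have hlen : l.length = i + 1 := by omega
        have hdone : l.drop (i + 1) = [] := List.drop_eq_nil_of_le (by omega)
        rw [show bigramStep l ([], acc, i) l[i] = ([l[i]], acc, i) by simp [bigramStep, hget]]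
        simp [hdone]
    · have hi' : l.length ≤ i := by omega
      simp [List.drop_eq_nil_of_le hi', List.drop_eq_nil_of_le (by omega : l.length ≤ i + 1)]

-- ===== VERDICT (by name: the statement is the Claim_ definition above) =====
theorem create_bigram_list_spec : Claim_equal_create_bigram_list := by
  intro l _
  show create_bigram_list l = create_bigram_list_alt l
  unfold create_bigram_list create_bigram_list_alt
  have h := bigram_fold_inv l l.length 0 [] (by omega)
  simpa [PySem.List.slice_from_one, List.drop_one] using h
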